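-- pv_equiv track=rewrite | github.com/madkerpe/deep-learning-tetris | reward.py | compute_column_height
-- ===== SOURCE A (Python) =====
-- def compute_column_height(column):
--
--     height = 0
--
--     found_top = False
--     for point in column:
--         if not found_top:
--             found_top = point == 1
--         if found_top:
--             height += 1
--
--     return height
-- ===== SOURCE B (Python) =====
-- def compute_column_height(column):
--     for i, point in enumerate(column):
--         if point == 1:
--             return len(column) - i
--     return 0
-- ===== Notes on version B (the rewrite author's own statement) =====
-- stated objective: simpler
-- what changed: Replaces the flag-plus-counter full scan with locate-the-first-1-then-subtract and an early return.
import Mathlib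
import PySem

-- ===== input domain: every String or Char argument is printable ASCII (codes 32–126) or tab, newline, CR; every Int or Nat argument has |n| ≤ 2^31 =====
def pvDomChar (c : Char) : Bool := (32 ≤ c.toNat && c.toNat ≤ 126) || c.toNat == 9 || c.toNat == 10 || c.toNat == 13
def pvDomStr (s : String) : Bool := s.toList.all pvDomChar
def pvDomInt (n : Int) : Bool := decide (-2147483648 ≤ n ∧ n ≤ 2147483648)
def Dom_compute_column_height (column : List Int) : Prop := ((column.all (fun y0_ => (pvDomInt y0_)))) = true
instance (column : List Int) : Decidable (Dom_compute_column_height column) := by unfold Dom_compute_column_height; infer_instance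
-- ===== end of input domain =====

-- B replaces A's flag-plus-counter scan with find-first-1-then-length-subtract (simpler).

-- ===== PORT A =====
-- for point in column: if not found: found = point == 1; if found: height += 1
def compute_column_height (column : List Int) : Int :=
  (column.foldl
    (fun (s : Bool × Int) point =>
      let found := s.1 || (point == 1)
      (found, if found then s.2 + 1 else s.2))
    (false, 0)).2

-- ===== PORT B =====
-- for i, point in enumerate(column): if point == 1: return len(column) - i; return 0
-- (remaining suffix at index i has length len(column) - i, so returning its length is the same value)
def compute_column_height_alt (column : List Int) : Int :=
  match column with
  | [] => 0
  | point :: rest => if point == 1 then (rest.length : Int) + 1 else compute_column_height_alt rest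

-- ===== PRECONDITION & SPEC =====
def Spec_compute_column_height (column : List Int) (out : Int) : Prop := out = compute_column_height_alt column
instance (column : List Int) (out : Int) : Decidable (Spec_compute_column_height column out) := by unfold Spec_compute_column_height; infer_instance

-- ===== CLAIM (what is proved, stated in full; the proofs are below) =====
def Claim_equal_compute_column_height : Prop := ∀ (column : List Int), Dom_compute_column_height column → Spec_compute_column_height column (compute_column_height column)

-- ===== LEMMAS AND PROOFS =====

def pvStepA (s : Bool × Int) (point : Int) : Bool × Int :=
  let found := s.1 || (point == 1)
  (found, if found then s.2 + 1 else s.2)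

-- once the flag is set, A just counts the remaining elements
theorem pvFoldA_true (l : List Int) (h : Int) :
    (l.foldl pvStepA (true, h)).2 = h + l.length := by
  induction l generalizing h with
  | nil => simp [pvStepA]
  | cons x xs ih => simp [pvStepA, ih]; ring

theorem pvFoldA_false (l : List Int) (h : Int) :
    (l.foldl pvStepA (false, h)).2 = h + compute_column_height_alt l := by
  induction l generalizing h with
  | nil => simp [compute_column_height_alt]
  | cons x xs ih =>
    by_cases hx : x = 1
    · simp [pvStepA, hx, compute_column_height_alt, pvFoldA_true]; ring
    · have hb : (x == 1) = false := by simp [hx]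
      simp [pvStepA, hb, hx, compute_column_height_alt, ih]

-- ===== VERDICT (by name: the statement is the Claim_ definition above) =====
theorem compute_column_height_spec : Claim_equal_compute_column_height := by
  intro column _
  unfold Spec_compute_column_height compute_column_height
  have : (fun (s : Bool × Int) point =>
      let found := s.1 || (point == 1)
      (found, if found then s.2 + 1 else s.2)) = pvStepA := rfl
  rw [this, pvFoldA_false]
  simp
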